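-- pv_equiv track=rewrite | github.com/AlenT1/autoticket | tests/test_may1_match_dirty_live.py | _add_mon_new
-- ===== SOURCE A (Python) =====
-- def _add_mon_new(text: str) -> str:
--     marker = (
--         "- MON-NEW Add 2026-Q3-DEADLINE-MAY1C burst-alerting verification "
--         "for spike traffic during launch\n"
--     )
--     lines = text.splitlines(keepends=True)
--     in_c = False
--     for i, line in enumerate(lines):
--         if line.startswith("## C. Monitoring"):
--             in_c = True
--             continue
--         if in_c and line.startswith("## "):
--             lines.insert(i, marker)
--             return "".join(lines)
--     return text + "\n" + marker
-- ===== SOURCE B (Python) =====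
-- def _add_mon_new(text: str) -> str:
--     marker = (
--         "- MON-NEW Add 2026-Q3-DEADLINE-MAY1C burst-alerting verification "
--         "for spike traffic during launch\n"
--     )
--     # Work directly on the raw string: a character position q is a line start
--     # iff q == 0 or the previous character is a line break.  Find the position
--     # of the first "## C. Monitoring" header line, then the position of the
--     # next section header line, and splice the marker in by string slicing.
--     n = len(text)
--
--     def at_line_start(q: int) -> bool:
--         return q == 0 or text[q - 1] in "\r\n"
--
--     c_pos = None
--     for i in range(n):
--         if at_line_start(i) and text.startswith("## C. Monitoring", i):
--             c_pos = i
--             break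
--     if c_pos is not None:
--         for q in range(c_pos + 1, n):
--             if (at_line_start(q) and text.startswith("## ", q)
--                     and not text.startswith("## C. Monitoring", q)):
--                 return text[:q] + marker + text[q:]
--     return text + "\n" + marker
-- ===== Notes on version B (the rewrite author's own statement) =====
-- stated objective: alternative
-- what changed: B never splits the text into a list of lines: it works on raw character positions (a position is a line start when it is zero or the preceding character is a line break), locates the C-header position and then the next section-header position via startswith at an offset, and splices the marker in by string slicing instead of list insert plus join.
import Mathlib
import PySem

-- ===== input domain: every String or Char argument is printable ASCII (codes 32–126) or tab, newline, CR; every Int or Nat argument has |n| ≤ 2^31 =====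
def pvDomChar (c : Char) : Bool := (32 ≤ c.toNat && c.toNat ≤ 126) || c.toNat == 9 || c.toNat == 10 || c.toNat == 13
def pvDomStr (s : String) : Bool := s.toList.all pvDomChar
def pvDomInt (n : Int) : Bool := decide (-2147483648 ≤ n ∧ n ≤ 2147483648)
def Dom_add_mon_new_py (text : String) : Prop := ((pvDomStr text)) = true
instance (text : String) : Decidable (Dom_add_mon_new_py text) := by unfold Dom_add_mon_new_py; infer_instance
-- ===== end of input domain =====

-- B never splits the text into lines: it scans raw character positions (a
-- position is a line start iff it is 0 or follows a break character), finds the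
-- C header position, then the next '## ' header position, and splices the
-- marker by string slicing; objective: alternative, no speed claim.

def pvMarker : List Char :=
  "- MON-NEW Add 2026-Q3-DEADLINE-MAY1C burst-alerting verification for spike traffic during launch\n".toList

def pvCpat : List Char := "## C. Monitoring".toList
def pvHpat : List Char := "## ".toList

-- ===== PORT A =====
-- text.splitlines(keepends=True), ported by hand (exact on the ASCII+tab/newline/CR
-- domain, where Python's line breaks are exactly '\n', '\r' and '\r\n')
def pvSplitKeep (acc : List Char) : List Char → List (List Char)
  | [] => if acc.isEmpty then [] else [acc.reverse]
  | '\r' :: '\n' :: rest => (acc.reverse ++ ['\r', '\n']) :: pvSplitKeep [] rest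
  | '\r' :: rest => (acc.reverse ++ ['\r']) :: pvSplitKeep [] rest
  | '\n' :: rest => (acc.reverse ++ ['\n']) :: pvSplitKeep [] rest
  | c :: rest => pvSplitKeep (c :: acc) rest
  termination_by l => l.length

def pvIsC (l : List Char) : Bool := PySem.Chars.startswith l pvCpat
def pvIsH (l : List Char) : Bool := PySem.Chars.startswith l pvHpat

-- A's for-loop over enumerate(lines) with the in_c flag; on the hit it does
-- lines.insert(i, marker) and returns "".join(lines)
def pvALoop (lines : List (List Char)) (i : Nat) (in_c : Bool) : List (List Char) → Option String
  | [] => none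
  | line :: rs =>
    if pvIsC line then pvALoop lines (i + 1) true rs
    else if in_c && pvIsH line then
      some (String.ofList (PySem.Chars.join [] (PySem.List.insert lines (Int.ofNat i) pvMarker)))
    else pvALoop lines (i + 1) in_c rs

def add_mon_new_py (text : String) : String :=
  let lines := pvSplitKeep [] text.toList
  match pvALoop lines 0 false lines with
  | some s => s
  | none => String.ofList (text.toList ++ '\n' :: pvMarker)

-- ===== PORT B =====
-- at_line_start(q): q == 0 or text[q-1] in "\r\n"
def pvIsBreak (c : Char) : Bool := c == '\n' || c == '\r'

def pvAtStart (cs : List Char) (q : Nat) : Bool :=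
  q == 0 ||
    (match cs[q - 1]? with
     | some c => pvIsBreak c
     | none => false)

-- text.startswith(pat, q)
def pvSw (cs : List Char) (q : Nat) (pat : List Char) : Bool :=
  PySem.Chars.startswith (cs.drop q) pat

-- first loop: for i in range(n): if at_line_start(i) and text.startswith(C, i): break
def pvPosFindC (cs : List Char) (i : Nat) : Option Nat :=
  if i < cs.length then
    if pvAtStart cs i && pvSw cs i pvCpat then some i else pvPosFindC cs (i + 1)
  else none
  termination_by cs.length - i

-- second loop: for q in range(c_pos+1, n): marker goes before the first '## '
-- (but not '## C. Monitoring') header line position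
def pvPosFindH (cs : List Char) (q : Nat) : Option Nat :=
  if q < cs.length then
    if pvAtStart cs q && pvSw cs q pvHpat && !pvSw cs q pvCpat then some q
    else pvPosFindH cs (q + 1)
  else none
  termination_by cs.length - q

def add_mon_new_py_alt (text : String) : String :=
  let cs := text.toList
  match pvPosFindC cs 0 with
  | some p =>
    match pvPosFindH cs (p + 1) with
    | some q => String.ofList (cs.take q ++ pvMarker ++ cs.drop q)
    | none => String.ofList (cs ++ '\n' :: pvMarker)
  | none => String.ofList (cs ++ '\n' :: pvMarker)

-- ===== PRECONDITION & SPEC =====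
def Spec_add_mon_new_py (text : String) (out : String) : Prop := out = add_mon_new_py_alt text
instance (text : String) (out : String) : Decidable (Spec_add_mon_new_py text out) := by unfold Spec_add_mon_new_py; infer_instance

-- ===== CLAIM =====
def Claim_equal_add_mon_new_py : Prop := ∀ (text : String), Dom_add_mon_new_py text → Spec_add_mon_new_py text (add_mon_new_py text)

-- ===== LEMMAS AND PROOFS =====

theorem pv_flatten_split (cs acc : List Char) :
    (pvSplitKeep acc cs).flatten = acc.reverse ++ cs := by
  induction acc, cs using pvSplitKeep.induct <;> simp_all [pvSplitKeep]

def pvLineOK : List Char → Bool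
  | [] => false
  | c :: rest =>
    if pvIsBreak c then rest == [] || (c == '\r' && rest == ['\n'])
    else pvLineOK rest

def pvGood : List (List Char) → Bool
  | [] => true
  | l :: rs => (pvLineOK l || (rs.isEmpty && !l.isEmpty && l.all (fun c => !pvIsBreak c))) && pvGood rs

theorem pv_lineOK_append (b k : List Char) (hb : b.all (fun c => !pvIsBreak c) = true)
    (hk : k = ['\n'] ∨ k = ['\r'] ∨ k = ['\r', '\n']) : pvLineOK (b ++ k) = true := by
  induction b with
  | nil => rcases hk with h | h | h <;> simp [h, pvLineOK] <;> decide
  | cons c b' ih =>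
    simp only [List.all_cons, Bool.and_eq_true] at hb
    have h2 := ih hb.2
    rcases hb with ⟨h1, -⟩
    cases b' with
    | nil =>
      rcases hk with h | h | h <;> simp_all [pvLineOK]
    | cons d b'' =>
      rcases hk with h | h | h <;> simp_all [pvLineOK]

theorem pv_good_split (cs acc : List Char) (h : acc.all (fun c => !pvIsBreak c) = true) :
    pvGood (pvSplitKeep acc cs) = true := by
  induction acc, cs using pvSplitKeep.induct with
  | case1 acc hne =>
      simp_all [pvSplitKeep, pvGood]
  | case2 acc hne =>
      have : (acc.reverse).all (fun c => !pvIsBreak c) = true := by simpa using h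
      simp_all [pvSplitKeep, pvGood]
  | case3 acc rest ih =>
      have hOK := pv_lineOK_append acc.reverse ['\r','\n'] (by simpa using h) (by simp)
      simp_all [pvSplitKeep, pvGood]
  | case4 acc rest hne ih =>
      have hOK := pv_lineOK_append acc.reverse ['\r'] (by simpa using h) (by simp)
      simp_all [pvSplitKeep, pvGood]
  | case5 acc rest ih =>
      have hOK := pv_lineOK_append acc.reverse ['\n'] (by simpa using h) (by simp)
      simp_all [pvSplitKeep, pvGood]
  | case6 acc c rest h1 h2 h3 ih =>
      rw [pvSplitKeep.eq_def]
      split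
      · simp_all
      · simp_all
      · simp_all
      · simp_all
      · rename_i heq
        injection heq with hc hr
        subst hc; subst hr
        apply ih
        have hc : pvIsBreak c = false := by
          simp only [pvIsBreak, Bool.or_eq_false_iff, beq_eq_false_iff_ne, ne_eq]
          exact ⟨h3, h2⟩
        simp_all

def pvIsStartB : Option Char → Bool
  | none => true
  | some c => pvIsBreak c

def pvScan (pred : List Char → Bool) : Option Char → List Char → Nat → Option Nat
  | _, [], _ => none
  | prev, c :: rest, q =>
    if pvIsStartB prev && pred (c :: rest) then some q
    else pvScan pred (some c) rest (q + 1)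

def pvPredC (xs : List Char) : Bool := PySem.Chars.startswith xs pvCpat

def pvPredH (xs : List Char) : Bool := PySem.Chars.startswith xs pvHpat && !PySem.Chars.startswith xs pvCpat

def pvLineScan (pred : List Char → Bool) : List (List Char) → Nat → Option Nat
  | [], _ => none
  | l :: rs, o => if pred (l ++ rs.flatten) then some o else pvLineScan pred rs (o + l.length)

def pvFind (lp : List Char → Bool) : List (List Char) → Option Nat
  | [] => none
  | l :: rs => if lp l then some 0 else (pvFind lp rs).map (· + 1)

def pvHP (l : List Char) : Bool := pvIsH l && !pvIsC l

def pvOfs (ls : List (List Char)) (k : Nat) : Nat := ((ls.take k).flatten).length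

def pvHeadHash (pred : List Char → Bool) : Prop :=
  ∀ c xs, pred (c :: xs) = true → c = '#'

theorem pv_scan_congr_prev (pred : List Char → Bool) (xs : List Char) (o : Nat)
    (p1 p2 : Option Char) (h : pvIsStartB p1 = pvIsStartB p2) :
    pvScan pred p1 xs o = pvScan pred p2 xs o := by
  cases xs with
  | nil => simp [pvScan]
  | cons c rest => simp [pvScan, h]

theorem pv_scan_nonbreak_none (pred : List Char → Bool) (t : List Char)
    (ht : t.all (fun c => !pvIsBreak c) = true) (prev : Option Char)
    (hp : pvIsStartB prev = false) (o : Nat) :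
    pvScan pred prev t o = none := by
  induction t generalizing prev o with
  | nil => simp [pvScan]
  | cons c rest ih =>
    simp only [List.all_cons, Bool.and_eq_true] at ht
    simp only [pvScan, hp, Bool.false_and, Bool.false_eq_true, if_false]
    exact ih ht.2 (some c) (by simpa [pvIsStartB] using ht.1) (o + 1)

theorem pv_pred_nl (pred : List Char → Bool) (hpred : pvHeadHash pred) (xs : List Char) :
    pred ('\n' :: xs) = false := by
  cases h : pred ('\n' :: xs)
  · rfl
  · exact absurd (hpred _ _ h) (by decide)

theorem pv_scan_consume_mid (pred : List Char → Bool) (hpred : pvHeadHash pred)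
    (l : List Char) (hl : pvLineOK l = true) :
    ∀ (xs : List Char) (o : Nat) (prev : Option Char), pvIsStartB prev = false →
      pvScan pred prev (l ++ xs) o = pvScan pred none xs (o + l.length) := by
  induction l with
  | nil => simp [pvLineOK] at hl
  | cons c rest ih =>
    intro xs o prev hp
    simp only [List.cons_append, pvScan, hp, Bool.false_and, Bool.false_eq_true, if_false]
    by_cases hb : pvIsBreak c = true
    · simp only [pvLineOK, hb, if_true] at hl
      rcases Bool.or_eq_true_iff.mp hl with h | h
      · have : rest = [] := by simpa using h
        subst this
        simp only [List.nil_append, List.length_cons, List.length_nil]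
        exact pv_scan_congr_prev pred xs (o + 1) (some c) none (by simp [pvIsStartB, hb])
      · simp only [Bool.and_eq_true, beq_iff_eq] at h
        obtain ⟨hc, hr⟩ := h
        subst hc; subst hr
        simp only [List.cons_append, List.nil_append, pvScan, pvIsStartB, pvIsBreak,
          pv_pred_nl pred hpred]
        simp only [List.length_cons, List.length_singleton]
        have : o + 1 + 1 = o + 2 := rfl
        rw [this]
        exact pv_scan_congr_prev pred xs (o + 2) (some '\n') none (by decide)
    · have hb' : pvIsBreak c = false := by revert hb; cases pvIsBreak c <;> simp
      simp only [pvLineOK, hb', Bool.false_eq_true, if_false] at hl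
      have := ih hl xs (o + 1) (some c) (by simp [pvIsStartB, hb'])
      rw [this]
      simp only [List.length_cons]
      congr 1
      omega

theorem pv_scan_consume (pred : List Char → Bool) (hpred : pvHeadHash pred)
    (l : List Char) (hl : pvLineOK l = true)
    (xs : List Char) (o : Nat) (prev : Option Char) (hp : pvIsStartB prev = true) :
    pvScan pred prev (l ++ xs) o =
      if pred (l ++ xs) then some o else pvScan pred none xs (o + l.length) := by
  cases l with
  | nil => simp [pvLineOK] at hl
  | cons c rest =>
    simp only [List.cons_append, pvScan, hp, Bool.true_and]
    by_cases hpr : pred (c :: (rest ++ xs)) = true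
    · simp [hpr]
    · have hpr' : pred (c :: (rest ++ xs)) = false := by revert hpr; cases pred (c :: (rest ++ xs)) <;> simp
      simp only [hpr', Bool.false_eq_true, if_false]
      by_cases hb : pvIsBreak c = true
      · simp only [pvLineOK, hb, if_true] at hl
        rcases Bool.or_eq_true_iff.mp hl with h | h
        · have : rest = [] := by simpa using h
          subst this
          simp only [List.nil_append, List.length_cons, List.length_nil]
          exact pv_scan_congr_prev pred xs (o + 1) (some c) none (by simp [pvIsStartB, hb])
        · simp only [Bool.and_eq_true, beq_iff_eq] at h
          obtain ⟨hc, hr⟩ := h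
          subst hc; subst hr
          simp only [List.cons_append, List.nil_append, pvScan, pvIsStartB, pvIsBreak,
            pv_pred_nl pred hpred]
          simp only [List.length_cons, List.length_singleton]
          have : o + 1 + 1 = o + 2 := rfl
          rw [this]
          exact pv_scan_congr_prev pred xs (o + 2) (some '\n') none (by decide)
      · have hb' : pvIsBreak c = false := by revert hb; cases pvIsBreak c <;> simp
        simp only [pvLineOK, hb', Bool.false_eq_true, if_false] at hl
        have := pv_scan_consume_mid pred hpred rest hl xs (o + 1) (some c) (by simp [pvIsStartB, hb'])
        rw [this]
        simp only [List.length_cons]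
        congr 1
        omega

theorem pv_scan_lines (pred : List Char → Bool) (hpred : pvHeadHash pred) :
    ∀ (ls : List (List Char)), pvGood ls = true →
      ∀ (o : Nat) (prev : Option Char), pvIsStartB prev = true →
        pvScan pred prev ls.flatten o = pvLineScan pred ls o := by
  intro ls
  induction ls with
  | nil => intro _ o prev _; simp [pvScan, pvLineScan]
  | cons l rs ih =>
    intro hg o prev hp
    simp only [pvGood, Bool.and_eq_true] at hg
    obtain ⟨hl, hgr⟩ := hg
    rcases Bool.or_eq_true_iff.mp hl with hOK | hLast
    · simp only [List.flatten_cons, pvLineScan]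
      rw [pv_scan_consume pred hpred l hOK _ o prev hp]
      split_ifs with h
      · rfl
      · exact ih hgr (o + l.length) none rfl
    · simp only [Bool.and_eq_true] at hLast
      obtain ⟨⟨hre, hne⟩, hnb⟩ := hLast
      have hrs : rs = [] := by simpa [List.isEmpty_iff] using hre
      subst hrs
      simp only [List.flatten_cons, List.flatten_nil, List.append_nil, pvLineScan]
      cases l with
      | nil => simp at hne
      | cons c t =>
        simp only [List.all_cons, Bool.and_eq_true] at hnb
        simp only [pvScan, hp, Bool.true_and]
        split_ifs with h
        · rfl
        · exact pv_scan_nonbreak_none pred t hnb.2 (some c) (by simpa [pvIsStartB] using hnb.1) (o + 1)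

theorem pv_lineOK_mem_break (l : List Char) (h : pvLineOK l = true) :
    ∃ c ∈ l, pvIsBreak c = true := by
  induction l with
  | nil => simp [pvLineOK] at h
  | cons c rest ih =>
    by_cases hb : pvIsBreak c = true
    · exact ⟨c, by simp, hb⟩
    · have hb' : pvIsBreak c = false := by revert hb; cases pvIsBreak c <;> simp
      simp only [pvLineOK, hb', Bool.false_eq_true, if_false] at h
      obtain ⟨d, hd1, hd2⟩ := ih h
      exact ⟨d, by simp [hd1], hd2⟩

theorem pv_sw_line (l xs pat : List Char) (hl : pvLineOK l = true)
    (hpat : pat.all (fun c => !pvIsBreak c) = true) :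
    PySem.Chars.startswith (l ++ xs) pat = PySem.Chars.startswith l pat := by
  cases h : PySem.Chars.startswith l pat
  · cases h2 : PySem.Chars.startswith (l ++ xs) pat
    · rfl
    · exfalso
      rw [PySem.Chars.startswith_iff] at h2
      by_cases hlen : pat.length ≤ l.length
      · have : pat <+: l := by
          rw [List.prefix_iff_eq_take] at h2 ⊢
          rwa [List.take_append_of_le_length hlen] at h2
        rw [← PySem.Chars.startswith_iff] at this
        rw [h] at this; exact Bool.false_ne_true this
      · have hlp : l <+: pat :=
          List.prefix_of_prefix_length_le (List.prefix_append l xs) h2 (by omega)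
        obtain ⟨c, hc1, hc2⟩ := pv_lineOK_mem_break l hl
        have : c ∈ pat := hlp.subset hc1
        have := List.all_eq_true.mp hpat c this
        simp [hc2] at this
  · rw [PySem.Chars.startswith_iff] at h ⊢
    exact h.trans (List.prefix_append l xs)

theorem pv_compat_C (l : List Char) (rs : List (List Char)) (h : pvGood (l :: rs) = true) :
    pvPredC (l ++ rs.flatten) = pvIsC l := by
  simp only [pvGood, Bool.and_eq_true] at h
  rcases Bool.or_eq_true_iff.mp h.1 with hOK | hLast
  · exact pv_sw_line l rs.flatten pvCpat hOK (by decide)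
  · simp only [Bool.and_eq_true] at hLast
    have hrs : rs = [] := by simpa [List.isEmpty_iff] using hLast.1.1
    subst hrs
    simp [pvPredC, pvIsC]

theorem pv_compat_H (l : List Char) (rs : List (List Char)) (h : pvGood (l :: rs) = true) :
    pvPredH (l ++ rs.flatten) = pvHP l := by
  simp only [pvGood, Bool.and_eq_true] at h
  rcases Bool.or_eq_true_iff.mp h.1 with hOK | hLast
  · unfold pvPredH pvHP pvIsH pvIsC
    rw [pv_sw_line l rs.flatten pvHpat hOK (by decide),
        pv_sw_line l rs.flatten pvCpat hOK (by decide)]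
  · simp only [Bool.and_eq_true] at hLast
    have hrs : rs = [] := by simpa [List.isEmpty_iff] using hLast.1.1
    subst hrs
    simp [pvPredH, pvHP, pvIsH, pvIsC]

theorem pv_lineScan_find (pred : List Char → Bool) (lp : List Char → Bool)
    (hcompat : ∀ l rs, pvGood (l :: rs) = true → pred (l ++ rs.flatten) = lp l) :
    ∀ (ls : List (List Char)), pvGood ls = true → ∀ (o : Nat),
      pvLineScan pred ls o = (pvFind lp ls).map (fun k => o + pvOfs ls k) := by
  intro ls
  induction ls with
  | nil => intro _ o; simp [pvLineScan, pvFind]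
  | cons l rs ih =>
    intro hg o
    have hgr : pvGood rs = true := by
      simp only [pvGood, Bool.and_eq_true] at hg; exact hg.2
    simp only [pvLineScan, pvFind, hcompat l rs hg]
    by_cases hl : lp l = true
    · simp [hl, pvOfs]
    · have hl' : lp l = false := by revert hl; cases lp l <;> simp
      simp only [hl', Bool.false_eq_true, if_false]
      rw [ih hgr (o + l.length)]
      cases pvFind lp rs with
      | none => simp
      | some k =>
        simp only [Option.map_some, Option.some.injEq]
        simp [pvOfs, List.take_succ_cons]
        omega

def pvPrev (cs : List Char) (i : Nat) : Option Char := if i = 0 then none else cs[i - 1]?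

theorem pv_atStart_eq (cs : List Char) (i : Nat) (h : i < cs.length) :
    pvAtStart cs i = pvIsStartB (pvPrev cs i) := by
  unfold pvAtStart pvPrev
  cases i with
  | zero => simp [pvIsStartB]
  | succ j =>
    have hj : j < cs.length := by omega
    simp [pvIsStartB, List.getElem?_eq_getElem hj]

theorem pv_posC_eq_scan (cs : List Char) (i : Nat) :
    pvPosFindC cs i = pvScan pvPredC (pvPrev cs i) (cs.drop i) i := by
  induction i using pvPosFindC.induct (cs := cs) with
  | case1 i h hc =>
    rw [pvPosFindC]
    rw [List.drop_eq_getElem_cons h]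
    simp only [pvScan, pv_atStart_eq cs i h]
    have hsw : pvSw cs i pvCpat = pvPredC (cs[i] :: cs.drop (i + 1)) := by
      unfold pvSw pvPredC
      rw [List.drop_eq_getElem_cons h]
    rw [← pv_atStart_eq cs i h, ← hsw]
    simp [h, hc]
  | case2 i h hc ih =>
    rw [pvPosFindC]
    rw [List.drop_eq_getElem_cons h]
    simp only [pvScan, pv_atStart_eq cs i h]
    have hsw : pvSw cs i pvCpat = pvPredC (cs[i] :: cs.drop (i + 1)) := by
      unfold pvSw pvPredC
      rw [List.drop_eq_getElem_cons h]
    rw [← pv_atStart_eq cs i h, ← hsw]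
    have hprev : pvPrev cs (i + 1) = some cs[i] := by
      unfold pvPrev
      simp [List.getElem?_eq_getElem h]
    rw [hprev] at ih
    simp [h, hc, ih]
  | case3 i h =>
    rw [pvPosFindC]
    rw [List.drop_of_length_le (by omega)]
    simp [pvScan, h]

theorem pv_posH_eq_scan (cs : List Char) (i : Nat) :
    pvPosFindH cs i = pvScan pvPredH (pvPrev cs i) (cs.drop i) i := by
  induction i using pvPosFindH.induct (cs := cs) with
  | case1 i h hc =>
    rw [pvPosFindH]
    rw [List.drop_eq_getElem_cons h]
    simp only [pvScan, pv_atStart_eq cs i h]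
    have hsw : (pvSw cs i pvHpat && !pvSw cs i pvCpat) = pvPredH (cs[i] :: cs.drop (i + 1)) := by
      unfold pvSw pvPredH
      rw [List.drop_eq_getElem_cons h]
    rw [← hsw, ← Bool.and_assoc]
    split_ifs with h2
    · rfl
    · exfalso
      apply h2
      simpa [pv_atStart_eq cs i h, Bool.and_eq_true] using hc
  | case2 i h hc ih =>
    rw [pvPosFindH]
    rw [List.drop_eq_getElem_cons h]
    simp only [pvScan, pv_atStart_eq cs i h]
    have hsw : (pvSw cs i pvHpat && !pvSw cs i pvCpat) = pvPredH (cs[i] :: cs.drop (i + 1)) := by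
      unfold pvSw pvPredH
      rw [List.drop_eq_getElem_cons h]
    rw [← hsw, ← Bool.and_assoc]
    have hprev : pvPrev cs (i + 1) = some cs[i] := by
      unfold pvPrev
      simp [List.getElem?_eq_getElem h]
    rw [hprev] at ih
    rw [ih]
    simp [h]
  | case3 i h =>
    rw [pvPosFindH]
    rw [List.drop_of_length_le (by omega)]
    simp [pvScan, h]

def pvAIdx (i : Nat) (in_c : Bool) : List (List Char) → Option Nat
  | [] => none
  | line :: rs =>
    if pvIsC line then pvAIdx (i + 1) true rs
    else if in_c && pvIsH line then some i
    else pvAIdx (i + 1) in_c rs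

-- basic facts ---------------------------------------------------------------

theorem pv_join_nil_flatten (ls : List (List Char)) : PySem.Chars.join [] ls = ls.flatten := by
  induction ls with
  | nil => simp [PySem.Chars.join_nil]
  | cons l rest ih =>
    cases rest with
    | nil => simp [PySem.Chars.join_singleton]
    | cons q r => simp [PySem.Chars.join_cons_cons, ih]

theorem pv_isC_isH (l : List Char) (h : pvIsC l = true) : pvIsH l = true := by
  unfold pvIsC at h
  unfold pvIsH
  rw [PySem.Chars.startswith_iff] at *
  exact List.IsPrefix.trans (by decide) h

theorem pv_aloop_eq (rs : List (List Char)) (lines : List (List Char)) (i : Nat) (in_c : Bool) :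
    pvALoop lines i in_c rs =
      (pvAIdx i in_c rs).map
        (fun k => String.ofList (PySem.Chars.join [] (PySem.List.insert lines (Int.ofNat k) pvMarker))) := by
  induction rs generalizing i in_c with
  | nil => simp [pvALoop, pvAIdx]
  | cons l rest ih =>
    simp only [pvALoop, pvAIdx]
    split_ifs <;> simp [ih]

theorem pv_aidx_true (rs : List (List Char)) (i : Nat) :
    pvAIdx i true rs = (pvFind pvHP rs).map (· + i) := by
  induction rs generalizing i with
  | nil => simp [pvAIdx, pvFind]
  | cons l rest ih =>
    simp only [pvAIdx, pvFind, pvHP]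
    by_cases hC : pvIsC l = true
    · simp only [hC, pv_isC_isH l hC, if_true, Bool.not_true, Bool.and_false,
        Bool.false_eq_true, if_false, ih]
      cases pvFind pvHP rest <;> simp <;> omega
    · have hC' : pvIsC l = false := by revert hC; cases pvIsC l <;> simp
      by_cases hH : pvIsH l = true
      · simp [hC', hH]
      · have hH' : pvIsH l = false := by revert hH; cases pvIsH l <;> simp
        simp only [hC', hH', Bool.false_eq_true, if_false, Bool.true_and,
          Bool.not_false, Bool.and_true, ih]
        cases pvFind pvHP rest <;> simp <;> omega

theorem pv_aidx_false (rs : List (List Char)) (i : Nat) :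
    pvAIdx i false rs =
      (pvFind pvIsC rs).bind
        (fun k => (pvFind pvHP (rs.drop (k + 1))).map (fun j => i + k + 1 + j)) := by
  induction rs generalizing i with
  | nil => simp [pvAIdx, pvFind]
  | cons l rest ih =>
    simp only [pvAIdx, pvFind]
    by_cases hC : pvIsC l = true
    · simp only [hC, if_true, Option.bind_some, List.drop_succ_cons, List.drop_zero,
        pv_aidx_true]
      cases pvFind pvHP rest <;> simp <;> omega
    · have hC' : pvIsC l = false := by revert hC; cases pvIsC l <;> simp
      simp only [hC', Bool.false_eq_true, if_false, Bool.false_and, ih]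
      cases hF : pvFind pvIsC rest with
      | none => simp
      | some k =>
        simp only [Option.map_some, Option.bind_some, List.drop_succ_cons]
        cases pvFind pvHP (rest.drop (k + 1)) <;> simp <;> omega

theorem pv_insert_eq {α : Type} (xs : List α) (j : Nat) (v : α) (h : j ≤ xs.length) :
    PySem.List.insert xs (Int.ofNat j) v = xs.take j ++ v :: xs.drop j := by
  unfold PySem.List.insert PySem.List.sliceIndices
  simp only [Int.ofNat_eq_natCast]
  have h1 : ¬ ((1 : Int) < 0) := by norm_num
  have h2 : ¬ ((j : Int) < 0) := by omega
  simp only [h1, h2, if_false]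
  have h3 : (min (j : Int) (xs.length : Int)).toNat = j := by omega
  simp [h3]

-- B-side: index scan = suffix scan ------------------------------------------

theorem pv_headHash_C : pvHeadHash pvPredC := by
  intro c xs h
  unfold pvPredC at h
  rw [PySem.Chars.startswith_iff] at h
  have : pvCpat = '#' :: "# C. Monitoring".toList := by decide
  rw [this] at h
  exact (List.cons_prefix_cons.mp h).1.symm

theorem pv_headHash_H : pvHeadHash pvPredH := by
  intro c xs h
  unfold pvPredH at h
  simp only [Bool.and_eq_true] at h
  rw [PySem.Chars.startswith_iff] at h
  have : pvHpat = '#' :: "# ".toList := by decide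
  rw [this] at h
  exact (List.cons_prefix_cons.mp h.1).1.symm

-- consume one well-formed line starting mid-line (prev is not a line start)

theorem pv_find_lt (lp : List Char → Bool) (ls : List (List Char)) (k : Nat)
    (h : pvFind lp ls = some k) : k < ls.length := by
  induction ls generalizing k with
  | nil => simp [pvFind] at h
  | cons l rs ih =>
    simp only [pvFind] at h
    split_ifs at h with hl
    · cases h; simp
    · cases hF : pvFind lp rs with
      | none => rw [hF] at h; simp at h
      | some k' =>
        rw [hF] at h
        simp only [Option.map_some, Option.some.injEq] at h
        have := ih k' hF
        simp only [List.length_cons]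
        omega

theorem pv_find_drop (lp : List Char → Bool) (ls : List (List Char)) (k : Nat)
    (h : pvFind lp ls = some k) :
    ∃ l, ls.drop k = l :: ls.drop (k + 1) ∧ lp l = true := by
  induction ls generalizing k with
  | nil => simp [pvFind] at h
  | cons l rs ih =>
    simp only [pvFind] at h
    split_ifs at h with hl
    · cases h; exact ⟨l, by simp, hl⟩
    · cases hF : pvFind lp rs with
      | none => rw [hF] at h; simp at h
      | some k' =>
        rw [hF] at h
        simp only [Option.map_some, Option.some.injEq] at h
        subst h
        obtain ⟨l', h1, h2⟩ := ih k' hF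
        exact ⟨l', by simpa using h1, h2⟩

theorem pv_good_drop (ls : List (List Char)) (k : Nat) (h : pvGood ls = true) :
    pvGood (ls.drop k) = true := by
  induction ls generalizing k with
  | nil => simp [h]
  | cons l rs ih =>
    cases k with
    | zero => simpa using h
    | succ k' =>
      simp only [pvGood, Bool.and_eq_true] at h
      simpa using ih k' h.2

theorem pv_ofs_succ (ls : List (List Char)) (k : Nat) (l : List Char)
    (h : ls[k]? = some l) : pvOfs ls (k + 1) = pvOfs ls k + l.length := by
  unfold pvOfs
  rw [List.take_succ, h]
  simp

theorem pv_ofs_add (ls : List (List Char)) (a b : Nat) :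
    pvOfs ls (a + b) = pvOfs ls a + pvOfs (ls.drop a) b := by
  unfold pvOfs
  rw [List.take_add]
  simp

-- ===== VERDICT =====

-- ===== VERDICT =====
theorem pv_lineOK_tail (t : List Char) (h : pvLineOK ('#' :: t) = true) :
    pvLineOK t = true := by
  simpa [pvLineOK, pvIsBreak] using h

theorem add_mon_new_py_spec : Claim_equal_add_mon_new_py := by
  intro text _
  unfold Spec_add_mon_new_py add_mon_new_py add_mon_new_py_alt
  simp only []
  set cs := text.toList with hcs
  set lines := pvSplitKeep [] cs with hlines
  have hflat : lines.flatten = cs := by simpa using pv_flatten_split cs []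
  have hgood : pvGood lines = true := pv_good_split cs [] rfl
  rw [pv_aloop_eq, pv_aidx_false, pv_posC_eq_scan]
  have hdrop0 : cs.drop 0 = cs := by simp
  rw [show pvPrev cs 0 = none from rfl, hdrop0, ← hflat,
      pv_scan_lines pvPredC pv_headHash_C lines hgood 0 none rfl,
      pv_lineScan_find pvPredC pvIsC pv_compat_C lines hgood 0]
  cases hC : pvFind pvIsC lines with
  | none => simp [hflat]
  | some k0 =>
    obtain ⟨l0, hdropL, hC0⟩ := pv_find_drop pvIsC lines k0 hC
    have hk0 : k0 < lines.length := pv_find_lt pvIsC lines k0 hC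
    have hget : lines[k0]? = some l0 := by
      have h1 : (lines.drop k0)[0]? = lines[k0]? := by
        simp [List.getElem?_drop]
      rw [← h1, hdropL]
      rfl
    -- l0 starts with '#'
    have hpre : pvCpat <+: l0 := (PySem.Chars.startswith_iff _ _).mp hC0
    obtain ⟨t, hl0⟩ : ∃ t, l0 = '#' :: t := by
      cases l0 with
      | nil =>
        exfalso
        have := hpre.length_le
        simp [pvCpat] at this
      | cons c t =>
        have hc : pvCpat = '#' :: "# C. Monitoring".toList := by decide
        rw [hc] at hpre
        exact ⟨t, by rw [(List.cons_prefix_cons.mp hpre).1.symm]⟩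
    set rest := lines.drop (k0 + 1) with hrest
    set p := pvOfs lines k0 with hp
    -- character-level decompositions
    have hsplit : cs = (lines.take k0).flatten ++ (l0 :: rest).flatten := by
      rw [← hdropL, ← List.flatten_append, List.take_append_drop, hflat]
    have hdropP : cs.drop p = l0 ++ rest.flatten := by
      rw [hsplit, hp]
      rw [show pvOfs lines k0 = ((lines.take k0).flatten).length from rfl]
      rw [List.drop_left]
      simp
    have hgetP : cs[p]? = some '#' := by
      have h1 : (cs.drop p)[0]? = cs[p]? := by simp [List.getElem?_drop]
      rw [← h1, hdropP, hl0]
      rfl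
    have hdropP1 : cs.drop (p + 1) = t ++ rest.flatten := by
      have : cs.drop (p + 1) = (cs.drop p).drop 1 := by
        rw [List.drop_drop]
      rw [this, hdropP, hl0]
      simp
    have hgood0 : pvGood (l0 :: rest) = true := by
      have := pv_good_drop lines k0 hgood
      rwa [hdropL] at this
    -- B's second scan in line form
    have hBH : pvPosFindH cs (p + 1) =
        (pvFind pvHP rest).map (fun j => p + l0.length + pvOfs rest j) := by
      rw [pv_posH_eq_scan]
      rw [show pvPrev cs (p + 1) = cs[p]? from by unfold pvPrev; simp, hgetP, hdropP1]
      have hg : (pvLineOK l0 || (rest.isEmpty && !l0.isEmpty && l0.all (fun c => !pvIsBreak c))) = true ∧ pvGood rest = true := by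
        simpa [pvGood] using hgood0
      rcases Bool.or_eq_true_iff.mp hg.1 with hOK | hLast
      · have ht : pvLineOK t = true := pv_lineOK_tail t (hl0 ▸ hOK)
        rw [pv_scan_consume_mid pvPredH pv_headHash_H t ht rest.flatten (p + 1) (some '#') (by decide),
            pv_scan_lines pvPredH pv_headHash_H rest hg.2 (p + 1 + t.length) none rfl,
            pv_lineScan_find pvPredH pvHP pv_compat_H rest hg.2 (p + 1 + t.length)]
        have : p + 1 + t.length = p + l0.length := by rw [hl0]; simp; omega
        rw [this]
      · simp only [Bool.and_eq_true] at hLast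
        have hre : rest = [] := by simpa [List.isEmpty_iff] using hLast.1.1
        have hnb : l0.all (fun c => !pvIsBreak c) = true := hLast.2
        rw [hl0] at hnb
        simp only [List.all_cons, Bool.and_eq_true] at hnb
        rw [hre]
        simp only [List.flatten_nil, List.append_nil, pvFind, Option.map_none]
        exact pv_scan_nonbreak_none pvPredH t hnb.2 (some '#') (by decide) (p + 1)
    simp only [Option.map_some, Option.bind_some, Nat.zero_add, ← hrest]
    rw [hflat, ← hp, hBH]
    cases hH : pvFind pvHP rest with
    | none => simp [hflat]
    | some jrel =>
      simp only [Option.map_some]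
      have hjr : jrel < rest.length := pv_find_lt pvHP rest jrel hH
      have hjlen : k0 + 1 + jrel ≤ lines.length := by
        rw [hrest, List.length_drop] at hjr
        omega
      rw [pv_insert_eq lines (k0 + 1 + jrel) pvMarker hjlen, pv_join_nil_flatten]
      -- B's position equals the flatten offset of line k0+1+jrel
      have hq : p + l0.length + pvOfs rest jrel = pvOfs lines (k0 + 1 + jrel) := by
        rw [pv_ofs_add lines (k0 + 1) jrel, ← hrest]
        have : pvOfs lines (k0 + 1) = p + l0.length := by
          rw [pv_ofs_succ lines k0 l0 hget, hp]
        omega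
      rw [hq]
      -- take/drop of the flattened list at a line boundary
      set j := k0 + 1 + jrel with hj
      have hsplitJ : cs = (lines.take j).flatten ++ (lines.drop j).flatten := by
        rw [← List.flatten_append, List.take_append_drop, hflat]
      have htake : cs.take (pvOfs lines j) = (lines.take j).flatten := by
        rw [hsplitJ, show pvOfs lines j = ((lines.take j).flatten).length from rfl,
            List.take_left]
      have hdropJ : cs.drop (pvOfs lines j) = (lines.drop j).flatten := by
        rw [hsplitJ, show pvOfs lines j = ((lines.take j).flatten).length from rfl,
            List.drop_left]
      rw [htake, hdropJ]
      simp
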